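-- pv_equiv track=rewrite | github.com/WinterRat/Code_Test | 백준/Gold/2447. 별 찍기 － 10/별 찍기 － 10.py | solve
-- ===== SOURCE A (Python) =====
-- def solve(pattern):
--     grid = []
--     for i in range(3 * len(pattern)): # 0 ~ 8 > 0 ~ 26 > 0 ~ 80
--         if i // len(pattern) == 1:
--             grid.append(pattern[i % len(pattern)] + " " * len(pattern) + pattern[i % len(pattern)])
--         else:
--             grid.append(pattern[i % len(pattern)] * 3)
--     return list(grid)
-- ===== SOURCE B (Python) =====
-- def solve(pattern):
--     n = len(pattern)
--     top = [row * 3 for row in pattern]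
--     middle = [row + " " * n + row for row in pattern]
--     return top + middle + top
-- ===== Notes on version B (the rewrite author's own statement) =====
-- stated objective: simpler
-- what changed: Replaces the single flattened loop over range(3*len) with its i//len band test and i%len indexing by three direct comprehensions over the pattern (top band reused for the bottom), concatenated.
import Mathlib
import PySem

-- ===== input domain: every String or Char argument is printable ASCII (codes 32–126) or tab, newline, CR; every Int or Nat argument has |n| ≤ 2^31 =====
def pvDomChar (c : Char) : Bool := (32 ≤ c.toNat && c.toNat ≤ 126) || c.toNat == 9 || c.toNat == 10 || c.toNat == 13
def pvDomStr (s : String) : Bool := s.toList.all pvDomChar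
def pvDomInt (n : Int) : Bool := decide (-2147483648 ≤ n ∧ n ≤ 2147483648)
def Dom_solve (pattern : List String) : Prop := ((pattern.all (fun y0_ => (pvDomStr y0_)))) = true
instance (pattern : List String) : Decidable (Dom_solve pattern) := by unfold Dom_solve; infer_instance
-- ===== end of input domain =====

-- B replaces A's single flattened loop over range(3*len) with its i//len band test and
-- i%len indexing by three direct passes over the pattern (top band reused for the bottom): simpler decomposition.

-- ===== PORT A =====
-- strings are built on List Char via String.ofList so the kernel can reduce them (exact for str concatenation / repetition)
def solve (pattern : List String) : List String :=
  (PySem.List.pyRange 0 (3 * (pattern.length : Int)) 1).foldl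
    (fun grid i =>
      if PySem.Int.floordiv i (pattern.length : Int) == 1 then
        grid ++ [String.ofList
          ((PySem.List.pyGetD pattern (PySem.Int.mod i (pattern.length : Int)) "").toList
            ++ PySem.List.pyRepeat [' '] (pattern.length : Int)
            ++ (PySem.List.pyGetD pattern (PySem.Int.mod i (pattern.length : Int)) "").toList)]
      else
        grid ++ [String.ofList
          (PySem.List.pyRepeat
            (PySem.List.pyGetD pattern (PySem.Int.mod i (pattern.length : Int)) "").toList 3)])
    []

-- ===== PORT B =====
def solve_alt (pattern : List String) : List String :=
  let top := pattern.map (fun row => String.ofList (PySem.List.pyRepeat row.toList 3))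
  let middle := pattern.map (fun row =>
    String.ofList (row.toList ++ PySem.List.pyRepeat [' '] (pattern.length : Int) ++ row.toList))
  top ++ middle ++ top

-- ===== PRECONDITION & SPEC =====
def Spec_solve (pattern : List String) (out : List String) : Prop := out = solve_alt pattern
instance (pattern : List String) (out : List String) : Decidable (Spec_solve pattern out) := by unfold Spec_solve; infer_instance

-- ===== CLAIM (what is proved, stated in full; the proofs are below) =====
def Claim_equal_solve : Prop := ∀ (pattern : List String), Dom_solve pattern → Spec_solve pattern (solve pattern)

-- ===== LEMMAS AND PROOFS =====
-- mapping row-lookup-by-index over the full range of indices recovers the list itself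
theorem range_getD_map (xs : List String) (f : String → String) :
    (List.range xs.length).map (fun t => f (xs.getD t "")) = xs.map f := by
  apply List.ext_getElem (by simp)
  intro i h1 h2
  simp [List.getD_eq_getElem?_getD, List.getElem?_eq_getElem (by simpa using h2)]

theorem band_map (pattern : List String) (k : Nat) (F : Int → String) (f : String → String)
    (hF : ∀ i : Int, 0 ≤ i → i < (pattern.length : Int) →
      F (i + k * pattern.length) = f (PySem.List.pyGetD pattern i "")) :
    (PySem.List.pyRange ((k * pattern.length : Nat) : Int) (((k+1) * pattern.length : Nat) : Int) 1).map F
      = pattern.map f := by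
  rw [PySem.List.pyRange_one, List.map_map]
  have hlen : (((k+1) * pattern.length : Nat) : Int) - ((k * pattern.length : Nat) : Int)
      = (pattern.length : Int) := by push_cast; ring
  rw [hlen]
  simp only [Int.toNat_natCast]
  have step : ∀ t ∈ List.range pattern.length,
      (F ∘ fun t : Nat => ((k * pattern.length : Nat) : Int) + ↑t) t
        = f (pattern.getD t "") := by
    intro t ht
    simp only [List.mem_range] at ht
    have := hF (t : Int) (by positivity) (by exact_mod_cast ht)
    rw [PySem.List.pyGetD_natCast] at this
    simpa [Function.comp, add_comm, push_cast] using this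
  rw [List.map_congr_left step, range_getD_map]

-- index arithmetic of one band, at a Nat index t < n
theorem band_idx (pattern : List String) (k t : Nat) (ht : t < pattern.length) :
    PySem.Int.floordiv ((t : Int) + (k : Nat) * (pattern.length : Int)) (pattern.length : Int) = (k : Int)
      ∧ PySem.Int.mod ((t : Int) + (k : Nat) * (pattern.length : Int)) (pattern.length : Int) = (t : Int) := by
  have h1 : ((t : Int) + (k : Nat) * (pattern.length : Int)) = ((t + k * pattern.length : Nat) : Int) := by
    push_cast; ring
  rw [h1, PySem.Int.floordiv_natCast, PySem.Int.mod_natCast,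
      Nat.add_mul_div_right _ _ (by omega), Nat.div_eq_of_lt ht,
      Nat.add_mul_mod_self_right, Nat.mod_eq_of_lt ht]
  simp

theorem solve_eq (pattern : List String) : solve pattern = solve_alt pattern := by
  unfold solve solve_alt
  have hbody : (fun (grid : List String) (i : Int) =>
      if PySem.Int.floordiv i (pattern.length : Int) == 1 then
        grid ++ [String.ofList
          ((PySem.List.pyGetD pattern (PySem.Int.mod i (pattern.length : Int)) "").toList
            ++ PySem.List.pyRepeat [' '] (pattern.length : Int)
            ++ (PySem.List.pyGetD pattern (PySem.Int.mod i (pattern.length : Int)) "").toList)]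
      else
        grid ++ [String.ofList (PySem.List.pyRepeat
          (PySem.List.pyGetD pattern (PySem.Int.mod i (pattern.length : Int)) "").toList 3)])
      = (fun grid i => grid ++ [(fun i : Int =>
          if PySem.Int.floordiv i (pattern.length : Int) == 1 then
            String.ofList ((PySem.List.pyGetD pattern (PySem.Int.mod i (pattern.length : Int)) "").toList
              ++ PySem.List.pyRepeat [' '] (pattern.length : Int)
              ++ (PySem.List.pyGetD pattern (PySem.Int.mod i (pattern.length : Int)) "").toList)
          else
            String.ofList (PySem.List.pyRepeat
              (PySem.List.pyGetD pattern (PySem.Int.mod i (pattern.length : Int)) "").toList 3)) i]) := by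
    funext grid i; beta_reduce; split_ifs <;> rfl
  rw [hbody, PySem.List.foldl_append_singleton_eq_map, List.nil_append]
  have hsplit : PySem.List.pyRange 0 (3 * (pattern.length : Int)) 1
      = PySem.List.pyRange ((0 * pattern.length : Nat) : Int) ((1 * pattern.length : Nat) : Int) 1
        ++ PySem.List.pyRange ((1 * pattern.length : Nat) : Int) ((2 * pattern.length : Nat) : Int) 1
        ++ PySem.List.pyRange ((2 * pattern.length : Nat) : Int) ((3 * pattern.length : Nat) : Int) 1 := by
    rw [← PySem.List.pyRange_one_append _ _ _ (by push_cast; omega) (by push_cast; omega),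
        ← PySem.List.pyRange_one_append _ _ _ (by push_cast; omega) (by push_cast; omega)]
    norm_num
  rw [hsplit, List.map_append, List.map_append]
  congr 1
  congr 1
  · -- top band, k = 0
    apply band_map pattern 0
    intro i h0 hlt
    obtain ⟨t, rfl⟩ := Int.eq_ofNat_of_zero_le h0
    have ht : t < pattern.length := by exact_mod_cast hlt
    rw [(band_idx pattern 0 t ht).1, (band_idx pattern 0 t ht).2]
    norm_num
  · -- middle band, k = 1
    apply band_map pattern 1
    intro i h0 hlt
    obtain ⟨t, rfl⟩ := Int.eq_ofNat_of_zero_le h0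
    have ht : t < pattern.length := by exact_mod_cast hlt
    rw [(band_idx pattern 1 t ht).1, (band_idx pattern 1 t ht).2]
    norm_num
  · -- bottom band, k = 2
    apply band_map pattern 2
    intro i h0 hlt
    obtain ⟨t, rfl⟩ := Int.eq_ofNat_of_zero_le h0
    have ht : t < pattern.length := by exact_mod_cast hlt
    rw [(band_idx pattern 2 t ht).1, (band_idx pattern 2 t ht).2]
    norm_num

-- ===== VERDICT (by name: the statement is the Claim_ definition above) =====
theorem solve_spec : Claim_equal_solve := by
  intro pattern _
  unfold Spec_solve
  exact solve_eq pattern
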